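-- pv_equiv track=rewrite | github.com/Bill-Mo/comp1531 | exam/exam/distance.py | longest_distance
-- ===== SOURCE A (Python) =====
-- def longest_distance(elements):
--     l = []
--     distance = 0
--     longest = 0
--     for idx, num in enumerate(elements):
--         if num not in l:
--             l.append(num)
--         else:
--             start = 0
--             is_found = False
--             while start < len(elements) and not is_found:
--                 if elements[start] == num:
--                     distance = idx - start
--                     longest = max(distance, longest)
--                     is_found = True
--                 start += 1
--     return longest
-- ===== SOURCE B (Python) =====
-- def longest_distance(elements):
--     # value-centric: the longest distance is the largest span (last occurrence
--     # minus first occurrence) over the distinct values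
--     rev = list(reversed(elements))
--     n = len(elements)
--     best = 0
--     for v in set(elements):
--         best = max(best, (n - 1 - rev.index(v)) - elements.index(v))
--     return best
-- ===== Notes on version B (the rewrite author's own statement) =====
-- stated objective: alternative
-- what changed: Instead of streaming positions with a seen-list and rescanning the list for the first occurrence at every duplicate, B iterates over the distinct values and computes each value's span as (last occurrence, found via the reversed list) minus (first occurrence), taking the maximum span.
import Mathlib
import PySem

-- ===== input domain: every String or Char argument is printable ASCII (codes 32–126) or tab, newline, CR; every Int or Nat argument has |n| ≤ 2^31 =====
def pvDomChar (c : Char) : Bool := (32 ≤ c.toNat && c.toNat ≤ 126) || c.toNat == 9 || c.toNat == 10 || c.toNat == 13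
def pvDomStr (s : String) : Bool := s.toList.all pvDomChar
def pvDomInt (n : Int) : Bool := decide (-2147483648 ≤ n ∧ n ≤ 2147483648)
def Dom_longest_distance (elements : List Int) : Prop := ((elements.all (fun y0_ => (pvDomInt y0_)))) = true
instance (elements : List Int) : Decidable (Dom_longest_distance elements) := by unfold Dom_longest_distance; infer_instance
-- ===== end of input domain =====

-- B is value-centric instead of position-streaming: it iterates the distinct values and takes the
-- largest span (last occurrence, via the reversed list, minus first occurrence); alternative, not faster.

-- ===== PORT A =====
-- the inner 'while start < len(elements) and not is_found' loop; the is_found flag becomes an early return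
def whileFindA (elements : List Int) (num idx : Int) (start : Nat) (distance longest : Int) : Int × Int :=
  if h : start < elements.length then
    if elements[start] = num then (idx - start, max (idx - (start : Int)) longest)
    else whileFindA elements num idx (start + 1) distance longest
  else (distance, longest)
termination_by elements.length - start

def stepA (elements : List Int) (st : List Int × Int × Int) (p : Int × Int) : List Int × Int × Int :=
  if p.2 ∉ st.1 then (st.1 ++ [p.2], st.2.1, st.2.2)
  else
    let r := whileFindA elements p.2 p.1 0 st.2.1 st.2.2
    (st.1, r.1, r.2)

def longest_distance (elements : List Int) : Int :=
  ((PySem.List.enumerate elements).foldl (stepA elements) (([] : List Int), (0 : Int), (0 : Int))).2.2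

-- ===== PORT B =====
-- (n - 1 - rev.index(v)) - elements.index(v); every v iterated comes from set(elements), so both
-- .index calls succeed in the Python and the getD 0 default is never taken
def pySpan (elements rev : List Int) (v : Int) : Int :=
  ((elements.length : Int) - 1 - (((PySem.List.index? rev v).getD 0 : Nat) : Int))
    - (((PySem.List.index? elements v).getD 0 : Nat) : Int)

def longest_distance_alt (elements : List Int) : Int :=
  let rev := elements.reverse
  (PySem.Set.ofList elements).foldl (fun best v => max best (pySpan elements rev v)) 0

-- ===== PRECONDITION & SPEC =====
def Spec_longest_distance (elements : List Int) (out : Int) : Prop := out = longest_distance_alt elements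
instance (elements : List Int) (out : Int) : Decidable (Spec_longest_distance elements out) := by unfold Spec_longest_distance; infer_instance

-- ===== CLAIM (what is proved, stated in full; the proofs are below) =====
def Claim_equal_longest_distance : Prop := ∀ (elements : List Int), Dom_longest_distance elements → Spec_longest_distance elements (longest_distance elements)

-- ===== LEMMAS AND PROOFS =====

-- the while loop, scanning p1 ++ num :: p2 from start ≤ p1.length with num ∉ p1, finds index p1.length
theorem whileFindA_spec (p1 p2 : List Int) (num idx d lg : Int) (start : Nat)
    (hnot : num ∉ p1) (hs : start ≤ p1.length) :
    whileFindA (p1 ++ num :: p2) num idx start d lg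
      = (idx - p1.length, max (idx - (p1.length : Int)) lg) := by
  induction hn : p1.length - start generalizing start with
  | zero =>
    have hse : start = p1.length := by omega
    subst hse
    rw [whileFindA]
    have hlt : p1.length < (p1 ++ num :: p2).length := by simp
    rw [dif_pos hlt, if_pos (by simp)]
  | succ n ih =>
    have hlt : start < p1.length := by omega
    rw [whileFindA]
    have hlt' : start < (p1 ++ num :: p2).length := by simp; omega
    have hne : (p1 ++ num :: p2)[start]'hlt' ≠ num := by
      rw [List.getElem_append_left hlt]
      intro hEq; exact hnot (hEq ▸ p1.getElem_mem hlt)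
    rw [dif_pos hlt', if_neg hne]
    exact ih (start + 1) (by omega) (by omega)

-- fold-max algebra
theorem foldl_max_assoc (c : Int → Int) (L : List Int) : ∀ (a b : Int),
    L.foldl (fun x v => max x (c v)) (max a b) = max a (L.foldl (fun x v => max x (c v)) b) := by
  induction L with
  | nil => intro a b; simp
  | cons x L ih =>
    intro a b
    simp only [List.foldl_cons]
    rw [max_assoc, ih]

theorem le_foldl_max (c : Int → Int) (L : List Int) : ∀ (a : Int),
    a ≤ L.foldl (fun x v => max x (c v)) a := by
  induction L with
  | nil => intro a; simp
  | cons x L ih =>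
    intro a
    simp only [List.foldl_cons]
    exact le_trans (le_max_left a (c x)) (ih _)

theorem foldl_max_congr (c c' : Int → Int) (L : List Int) (h : ∀ v ∈ L, c v = c' v) : ∀ (a : Int),
    L.foldl (fun x v => max x (c v)) a = L.foldl (fun x v => max x (c' v)) a := by
  induction L with
  | nil => intro a; rfl
  | cons x L ih =>
    intro a
    simp only [List.foldl_cons]
    rw [h x (by simp), ih (fun v hv => h v (by simp [hv]))]

-- span bookkeeping on pre ++ [num]
theorem span_append_of_ne (pre : List Int) (num v : Int) (hv : v ∈ pre) (hne : v ≠ num) :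
    pySpan (pre ++ [num]) (pre ++ [num]).reverse v = pySpan pre pre.reverse v := by
  obtain ⟨j, hj⟩ := Option.isSome_iff_exists.mp
    ((PySem.List.index?_isSome_iff pre.reverse v).mpr (by simpa using hv))
  have h1 : PySem.List.index? (pre ++ [num]) v = PySem.List.index? pre v :=
    PySem.List.index?_append_of_mem _ hv
  have h2 : PySem.List.index? (pre ++ [num]).reverse v = some (j + 1) := by
    rw [List.reverse_append, List.reverse_singleton, List.singleton_append,
      PySem.List.index?_cons_of_ne _ (fun hEq => hne hEq.symm), hj]
    rfl
  unfold pySpan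
  rw [h1, h2, hj]
  simp
  ring

theorem span_append_self_mem (pre : List Int) (num : Int) (hv : num ∈ pre) :
    pySpan (pre ++ [num]) (pre ++ [num]).reverse num
      = (pre.length : Int) - (((PySem.List.index? pre num).getD 0 : Nat) : Int) := by
  have h1 : PySem.List.index? (pre ++ [num]) num = PySem.List.index? pre num :=
    PySem.List.index?_append_of_mem _ hv
  have h2 : PySem.List.index? (pre ++ [num]).reverse num = some 0 := by
    rw [List.reverse_append, List.reverse_singleton, List.singleton_append,
      PySem.List.index?_cons_self]
  unfold pySpan
  rw [h1, h2]
  simp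

theorem span_le_new (pre : List Int) (num : Int) (hv : num ∈ pre) :
    pySpan pre pre.reverse num
      ≤ (pre.length : Int) - (((PySem.List.index? pre num).getD 0 : Nat) : Int) := by
  obtain ⟨j, hj⟩ := Option.isSome_iff_exists.mp
    ((PySem.List.index?_isSome_iff pre.reverse num).mpr (by simpa using hv))
  unfold pySpan
  rw [hj]
  simp
  omega

theorem span_append_self_not_mem (pre : List Int) (num : Int) (hv : num ∉ pre) :
    pySpan (pre ++ [num]) (pre ++ [num]).reverse num = 0 := by
  have h1 : PySem.List.index? (pre ++ [num]) num = some pre.length :=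
    PySem.List.index?_append_singleton_self _ _ hv
  have h2 : PySem.List.index? (pre ++ [num]).reverse num = some 0 := by
    rw [List.reverse_append, List.reverse_singleton, List.singleton_append,
      PySem.List.index?_cons_self]
  unfold pySpan
  rw [h1, h2]
  simp

theorem ofList_append_singleton (pre : List Int) (num : Int) :
    PySem.Set.ofList (pre ++ [num])
      = if num ∈ pre then PySem.Set.ofList pre else PySem.Set.ofList pre ++ [num] := by
  rw [PySem.Set.ofList_eq_foldl, List.foldl_append, ← PySem.Set.ofList_eq_foldl]
  simp only [List.foldl_cons, List.foldl_nil, PySem.Set.add]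
  by_cases h : num ∈ pre
  · have hc : PySem.Set.contains (PySem.Set.ofList pre) num = true := by
      simp only [PySem.Set.contains, List.contains_iff_mem]
      exact (PySem.Set.mem_ofList pre num).mpr h
    rw [if_pos hc, if_pos h]
  · have hc : ¬ PySem.Set.contains (PySem.Set.ofList pre) num = true := by
      simp only [PySem.Set.contains, List.contains_iff_mem]
      intro hm
      exact h ((PySem.Set.mem_ofList pre num).mp hm)
    rw [if_neg hc, if_neg h]

-- B on pre ++ [num]: a fresh value contributes a zero span
theorem alt_append_not_mem (pre : List Int) (num : Int) (h : num ∉ pre) :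
    longest_distance_alt (pre ++ [num]) = longest_distance_alt pre := by
  unfold longest_distance_alt
  rw [ofList_append_singleton, if_neg h, List.foldl_append]
  simp only [List.foldl_cons, List.foldl_nil]
  rw [foldl_max_congr _ (pySpan pre pre.reverse) _
    (fun v hv => span_append_of_ne pre num v
      ((PySem.Set.mem_ofList pre v).mp hv)
      (fun hEq => h (hEq ▸ (PySem.Set.mem_ofList pre v).mp hv)))]
  rw [span_append_self_not_mem pre num h]
  have h0 : (0 : Int) ≤ (PySem.Set.ofList pre).foldl (fun x v => max x (pySpan pre pre.reverse v)) 0 :=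
    le_foldl_max _ _ 0
  omega

theorem max_fold_update (c : Int → Int) (s2 : List Int) (M1 N cn : Int) (hle : cn ≤ N) :
    s2.foldl (fun x v => max x (c v)) (max M1 N)
      = max (s2.foldl (fun x v => max x (c v)) (max M1 cn)) N := by
  rw [max_comm M1 N, foldl_max_assoc, max_comm M1 cn, foldl_max_assoc]
  omega

-- B on pre ++ [num]: a duplicate raises num's span to |pre| - first index
theorem alt_append_mem (pre : List Int) (num : Int) (h : num ∈ pre) :
    longest_distance_alt (pre ++ [num])
      = max (longest_distance_alt pre)
          ((pre.length : Int) - (((PySem.List.index? pre num).getD 0 : Nat) : Int)) := by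
  unfold longest_distance_alt
  rw [ofList_append_singleton, if_pos h]
  obtain ⟨s1, s2, hsplit⟩ := List.append_of_mem ((PySem.Set.mem_ofList pre num).mpr h)
  have hnodup : (s1 ++ num :: s2).Nodup := hsplit ▸ PySem.Set.nodup_ofList pre
  have hn12 : num ∉ s1 ++ s2 := (List.nodup_cons.mp ((List.nodup_middle).mp hnodup)).1
  have hn1 : num ∉ s1 := fun hmem => hn12 (List.mem_append_left _ hmem)
  have hn2 : num ∉ s2 := fun hmem => hn12 (List.mem_append_right _ hmem)
  have hmem_pre : ∀ v ∈ s1 ++ num :: s2, v ∈ pre := by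
    intro v hv
    exact (PySem.Set.mem_ofList pre v).mp (hsplit ▸ hv)
  rw [hsplit]
  have hagree1 : ∀ v ∈ s1, pySpan (pre ++ [num]) (pre ++ [num]).reverse v = pySpan pre pre.reverse v := by
    intro v hv
    exact span_append_of_ne pre num v (hmem_pre v (by simp [hv])) (fun hEq => hn1 (hEq ▸ hv))
  have hagree2 : ∀ v ∈ s2, pySpan (pre ++ [num]) (pre ++ [num]).reverse v = pySpan pre pre.reverse v := by
    intro v hv
    exact span_append_of_ne pre num v (hmem_pre v (by simp [hv])) (fun hEq => hn2 (hEq ▸ hv))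
  simp only [List.foldl_append, List.foldl_cons]
  rw [foldl_max_congr _ (pySpan pre pre.reverse) s1 hagree1,
      foldl_max_congr _ (pySpan pre pre.reverse) s2 hagree2,
      span_append_self_mem pre num h]
  exact max_fold_update (pySpan pre pre.reverse) s2 _ _ _ (span_le_new pre num h)

-- the A fold on the remaining suffix, given that lg is already B's answer for the prefix
theorem fold_eq (elements : List Int) : ∀ (rest pre l : List Int) (d lg : Int),
    elements = pre ++ rest →
    (∀ x, x ∈ l ↔ x ∈ pre) →
    lg = longest_distance_alt pre →
    ((PySem.List.enumerate rest (pre.length : Int)).foldl (stepA elements) (l, d, lg)).2.2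
      = longest_distance_alt elements := by
  intro rest
  induction rest with
  | nil =>
    intro pre l d lg helems _ hlg
    simp [PySem.List.enumerate_nil, hlg, helems]
  | cons num rest ih =>
    intro pre l d lg helems hl hlg
    rw [PySem.List.enumerate_cons, List.foldl_cons]
    by_cases hmem : num ∈ pre
    · -- duplicate: A rescans for the first occurrence, B's span of num rises to |pre| - first
      have hlm : num ∈ l := (hl num).2 hmem
      obtain ⟨f, hfp⟩ := Option.isSome_iff_exists.mp
        ((PySem.List.index?_isSome_iff pre num).mpr hmem)
      obtain ⟨q1, q2, hq, hqlen, hqnot⟩ := (PySem.List.index?_eq_some_iff pre num f).mp hfp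
      have helems' : elements = q1 ++ num :: (q2 ++ num :: rest) := by
        rw [helems, hq]; simp
      have hwf := whileFindA_spec q1 (q2 ++ num :: rest) num (pre.length : Int) d lg 0 hqnot (Nat.zero_le _)
      have hA : stepA elements (l, d, lg) ((pre.length : Int), num)
          = (l, (pre.length : Int) - (f : Int), max ((pre.length : Int) - (f : Int)) lg) := by
        rw [stepA]
        simp only [hlm, not_true_eq_false, if_false]
        rw [helems', hwf, hqlen]
      rw [hA]
      have hcast : (pre.length : Int) + 1 = ((pre ++ [num]).length : Int) := by simp
      rw [hcast]
      refine ih (pre ++ [num]) l _ _ (by rw [helems]; simp) ?_ ?_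
      · intro x; rw [hl x]; simp; intro hx; subst hx; exact hmem
      · rw [alt_append_mem pre num hmem, hfp, hlg, max_comm]
        rfl
    · -- fresh value: A appends to the seen list, B's new span is zero
      have hlm : num ∉ l := fun hm => hmem ((hl num).1 hm)
      have hA : stepA elements (l, d, lg) ((pre.length : Int), num) = (l ++ [num], d, lg) := by
        rw [stepA]; simp [hlm]
      rw [hA]
      have hcast : (pre.length : Int) + 1 = ((pre ++ [num]).length : Int) := by simp
      rw [hcast]
      refine ih (pre ++ [num]) (l ++ [num]) _ _ (by rw [helems]; simp) ?_ ?_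
      · intro x; simp [hl x]
      · rw [alt_append_not_mem pre num hmem, hlg]

-- ===== VERDICT (by name: the statement is the Claim_ definition above) =====
theorem longest_distance_spec : Claim_equal_longest_distance := by
  intro elements _
  unfold Spec_longest_distance longest_distance
  have h := fold_eq elements elements [] [] 0 0 (by simp) (by simp) (by rfl)
  simpa using h
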